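-- pv_equiv track=rewrite | github.com/StasonJatham/stonkmarket2 | app/portfolio/service.py | split_tools
-- ===== SOURCE A (Python) =====
-- HEAVY_TOOLS = {
--     "vectorbt",
--     "mlfinlab",
--     "prophet",
--     "arch",
--     "gluonts",
--     "pyflux",
--     "lppls",
--     "eiten",
--     "fbprophet",
-- }
--
-- def _normalize_tool_name(tool: str) -> str:
--     return tool.strip().lower()
--
-- def split_tools(tools: list[str]) -> tuple[list[str], list[str]]:
--     """Split tools into lightweight and heavy."""
--     seen = set()
--     normalized: list[str] = []
--     for tool in tools:
--         key = _normalize_tool_name(tool)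
--         if key and key not in seen:
--             seen.add(key)
--             normalized.append(key)
--     light = [tool for tool in normalized if tool not in HEAVY_TOOLS]
--     heavy = [tool for tool in normalized if tool in HEAVY_TOOLS]
--     return light, heavy
-- ===== SOURCE B (Python) =====
-- HEAVY_TOOLS = {
--     "vectorbt",
--     "mlfinlab",
--     "prophet",
--     "arch",
--     "gluonts",
--     "pyflux",
--     "lppls",
--     "eiten",
--     "fbprophet",
-- }
--
-- def _normalize_tool_name(tool: str) -> str:
--     return tool.strip().lower()
--
-- def split_tools(tools: list[str]) -> tuple[list[str], list[str]]:
--     """Split tools into lightweight and heavy.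
--
--     Dedup without a running seen-set: a reversed-overwrite dict comprehension
--     maps each key to its FIRST index; a key is kept exactly at that position.
--     """
--     keys = [_normalize_tool_name(tool) for tool in tools]
--     first = {k: i for i, k in reversed(list(enumerate(keys)))}
--     uniq = [k for i, k in enumerate(keys) if k and first[k] == i]
--     light = [k for k in uniq if k not in HEAVY_TOOLS]
--     heavy = [k for k in uniq if k in HEAVY_TOOLS]
--     return light, heavy
-- ===== Notes on version B (the rewrite author's own statement) =====
-- stated objective: alternative
-- what changed: Dedup is done without any mutable seen-set interleaved with output: B builds a first-occurrence-index map by a reversed-overwrite dict comprehension and then keeps a normalized key exactly when its position equals that first index, a stateless positional criterion instead of A's running set accumulator.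
import Mathlib
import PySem

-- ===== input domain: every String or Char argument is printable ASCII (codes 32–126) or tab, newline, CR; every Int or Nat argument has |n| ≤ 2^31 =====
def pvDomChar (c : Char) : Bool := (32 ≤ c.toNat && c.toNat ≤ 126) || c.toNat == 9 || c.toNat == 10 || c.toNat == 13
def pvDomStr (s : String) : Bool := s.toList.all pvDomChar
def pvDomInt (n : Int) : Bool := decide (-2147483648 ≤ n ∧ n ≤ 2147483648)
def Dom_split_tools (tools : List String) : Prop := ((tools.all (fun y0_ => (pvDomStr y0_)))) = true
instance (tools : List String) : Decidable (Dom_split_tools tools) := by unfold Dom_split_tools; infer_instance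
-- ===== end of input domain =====

-- ===== PORT A =====
-- B replaces A's mutable seen-set dedup by a stateless first-occurrence-index test
-- (keep key iff keys.index(key) == its position); alternative decomposition, not faster.
def pvHeavyTools : List String :=
  ["vectorbt", "mlfinlab", "prophet", "arch", "gluonts", "pyflux", "lppls", "eiten", "fbprophet"]

def pvNormalizeToolName (tool : String) : String :=
  PySem.Str.lower (PySem.Str.strip tool)

-- the loop body of A, after `key = _normalize_tool_name(tool)` has been computed
def pvStepKey (st : PySem.Set String × List String) (key : String) :
    PySem.Set String × List String :=
  if key ≠ "" ∧ key ∉ st.1 then (PySem.Set.add st.1 key, st.2 ++ [key]) else st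

def pvStepA (st : PySem.Set String × List String) (tool : String) :
    PySem.Set String × List String :=
  pvStepKey st (pvNormalizeToolName tool)

def split_tools (tools : List String) : List String × List String :=
  let st := tools.foldl pvStepA (PySem.Set.empty, [])
  let light := st.2.filter (fun t => !(pvHeavyTools.contains t))
  let heavy := st.2.filter (fun t => pvHeavyTools.contains t)
  (light, heavy)

-- ===== PORT B =====
-- `first = {k: i for i, k in reversed(list(enumerate(keys)))}`
def pvFirstIdx (keys : List String) : PySem.Dict String Int :=
  ((PySem.List.enumerate keys 0).reverse).foldl (fun d p => PySem.Dict.insert d p.2 p.1)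
    PySem.Dict.empty

def split_tools_alt (tools : List String) : List String × List String :=
  let keys := tools.map pvNormalizeToolName
  let first := pvFirstIdx keys
  let uniq := ((PySem.List.enumerate keys 0).filter
      (fun p => decide (p.2 ≠ "" ∧ first.get? p.2 = some p.1))).map (·.2)
  let light := uniq.filter (fun t => !(pvHeavyTools.contains t))
  let heavy := uniq.filter (fun t => pvHeavyTools.contains t)
  (light, heavy)

-- ===== PRECONDITION & SPEC =====
def Spec_split_tools (tools : List String) (out : List String × List String) : Prop := out = split_tools_alt tools
instance (tools : List String) (out : List String × List String) : Decidable (Spec_split_tools tools out) := by unfold Spec_split_tools; infer_instance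

-- ===== CLAIM (what is proved, stated in full; the proofs are below) =====
def Claim_equal_split_tools : Prop := ∀ (tools : List String), Dom_split_tools tools → Spec_split_tools tools (split_tools tools)

-- ===== LEMMAS AND PROOFS =====

-- B's comprehension filter, with the dict lookup replaced by the first-occurrence index
def pvKeep (keys : List String) (p : Int × String) : Bool :=
  decide (p.2 ≠ "" ∧ (PySem.List.index? keys p.2).map (fun j => (j : Int)) = some p.1)

-- the reversed-overwrite insert loop ends with each key bound to its FIRST index
lemma pv_fold_rev (ks : List String) (s : Int) (d : PySem.Dict String Int) (k : String) :
    ((((PySem.List.enumerate ks s).reverse).foldl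
        (fun d p => PySem.Dict.insert d p.2 p.1) d).get? k) =
      ((PySem.List.index? ks k).map (fun j => s + (j : Int))).or (d.get? k) := by
  induction ks generalizing s d with
  | nil => simp [PySem.List.enumerate, PySem.List.index?_eq_idxOf?]
  | cons x ks ih =>
    rw [PySem.List.enumerate_cons, List.reverse_cons, List.foldl_append]
    simp only [List.foldl_cons, List.foldl_nil]
    rw [PySem.Dict.get?_insert]
    by_cases hxk : k = x
    · subst hxk
      rw [if_pos rfl, PySem.List.index?_cons_self]
      simp
    · rw [if_neg hxk, ih, PySem.List.index?_cons_of_ne ks (Ne.symm hxk)]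
      rcases PySem.List.index? ks k with _ | j
      · simp
      · simp
        ring_nf

lemma pv_get_first (keys : List String) (k : String) :
    (pvFirstIdx keys).get? k = (PySem.List.index? keys k).map (fun j => (j : Int)) := by
  rw [pvFirstIdx, pv_fold_rev]
  rcases PySem.List.index? keys k with _ | j <;> simp

-- recursive specification of A's dedup loop
def pvDed (seen : PySem.Set String) : List String → List String
  | [] => []
  | k :: ks => if k ≠ "" ∧ k ∉ seen then k :: pvDed (PySem.Set.add seen k) ks else pvDed seen ks

lemma pv_foldA_eq (ks : List String) (seen : PySem.Set String) (acc : List String) :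
    (List.foldl pvStepKey (seen, acc) ks).2 = acc ++ pvDed seen ks := by
  induction ks generalizing seen acc with
  | nil => simp [pvDed]
  | cons k ks ih =>
    by_cases h : k ≠ "" ∧ k ∉ seen
    · simp [pvStepKey, pvDed, h, ih]
    · simp [pvStepKey, pvDed, h, ih]

lemma pv_index_first (pre : List String) (k : String) (ks : List String) (h : k ∉ pre) :
    PySem.List.index? (pre ++ k :: ks) k = some pre.length :=
  (PySem.List.index?_eq_some_iff _ _ _).2 ⟨pre, ks, rfl, rfl, h⟩

lemma pv_index_mem (pre rest : List String) (k : String) (h : k ∈ pre) :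
    ∃ j, PySem.List.index? (pre ++ rest) k = some j ∧ j < pre.length := by
  rw [PySem.List.index?_append_of_mem rest h]
  obtain ⟨j, hj⟩ := Option.isSome_iff_exists.1 ((PySem.List.index?_isSome_iff pre k).2 h)
  refine ⟨j, hj, ?_⟩
  obtain ⟨a, b, hab, hlen, _⟩ := (PySem.List.index?_eq_some_iff pre k j).1 hj
  subst hab; subst hlen; simp

lemma pv_ded_eq_enum (ks : List String) (pre : List String) (seen : PySem.Set String)
    (h : ∀ k, k ∈ seen ↔ (k ∈ pre ∧ k ≠ "")) :
    pvDed seen ks =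
      ((PySem.List.enumerate ks (pre.length : Int)).filter (pvKeep (pre ++ ks))).map (·.2) := by
  induction ks generalizing pre seen with
  | nil => simp [pvDed, PySem.List.enumerate]
  | cons k ks ih =>
    rw [PySem.List.enumerate_cons, List.filter_cons]
    by_cases hk : k ≠ "" ∧ k ∉ seen
    · -- kept: k ≠ "" and (by the invariant) k ∉ pre
      have hkp : k ∉ pre := fun hm => hk.2 ((h k).2 ⟨hm, hk.1⟩)
      have hkeep : pvKeep (pre ++ k :: ks) ((pre.length : Int), k) = true := by
        unfold pvKeep
        exact decide_eq_true ⟨hk.1, by rw [pv_index_first pre k ks hkp]; rfl⟩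
      have hinv : ∀ k', k' ∈ PySem.Set.add seen k ↔ (k' ∈ pre ++ [k] ∧ k' ≠ "") := by
        intro k'
        rw [PySem.Set.mem_add]
        constructor
        · rintro (hs | rfl)
          · exact ⟨List.mem_append_left _ ((h k').1 hs).1, ((h k').1 hs).2⟩
          · exact ⟨List.mem_append_right _ (by simp), hk.1⟩
        · rintro ⟨hm, hne⟩
          rcases List.mem_append.1 hm with hm | hm
          · exact Or.inl ((h k').2 ⟨hm, hne⟩)
          · simp at hm; exact Or.inr hm
      have hih := ih (pre ++ [k]) (PySem.Set.add seen k) hinv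
      simp only [List.append_assoc, List.singleton_append, List.length_append,
        List.length_singleton, Nat.cast_add, Nat.cast_one] at hih
      rw [pvDed, if_pos hk, hkeep, if_pos rfl, List.map_cons, hih]
    · -- skipped: either k = "" or k ∈ seen (hence k ∈ pre)
      have hkeep : pvKeep (pre ++ k :: ks) ((pre.length : Int), k) = false := by
        unfold pvKeep
        refine decide_eq_false ?_
        rintro ⟨hne, heq⟩
        have hks : k ∈ seen := by by_contra hns; exact hk ⟨hne, hns⟩
        obtain ⟨j, hj, hjl⟩ := pv_index_mem pre (k :: ks) k ((h k).1 hks).1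
        rw [hj] at heq
        have hji : (j : Int) = (pre.length : Int) := by simpa using heq
        omega
      have hinv : ∀ k', k' ∈ seen ↔ (k' ∈ pre ++ [k] ∧ k' ≠ "") := by
        intro k'
        constructor
        · intro hs
          exact ⟨List.mem_append_left _ ((h k').1 hs).1, ((h k').1 hs).2⟩
        · rintro ⟨hm, hne⟩
          rcases List.mem_append.1 hm with hm | hm
          · exact (h k').2 ⟨hm, hne⟩
          · simp at hm; subst hm
            by_cases hke : k' = ""
            · exact absurd hke hne
            · exact (by by_contra hns; exact hk ⟨hke, hns⟩ : k' ∈ seen)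
      have hih := ih (pre ++ [k]) seen hinv
      simp only [List.append_assoc, List.singleton_append, List.length_append,
        List.length_singleton, Nat.cast_add, Nat.cast_one] at hih
      rw [pvDed, if_neg hk, hkeep, if_neg (by simp), hih]

lemma pv_empty_inv : ∀ k, k ∈ (PySem.Set.empty : PySem.Set String) ↔ (k ∈ ([] : List String) ∧ k ≠ "") := by
  intro k; simp [PySem.Set.empty]

-- ===== VERDICT (by name: the statement is the Claim_ definition above) =====
theorem split_tools_spec : Claim_equal_split_tools := by
  intro tools _
  show split_tools tools = split_tools_alt tools
  have hfold : tools.foldl pvStepA (PySem.Set.empty, []) =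
      (tools.map pvNormalizeToolName).foldl pvStepKey (PySem.Set.empty, []) := by
    rw [List.foldl_map]; rfl
  have h1 := pv_foldA_eq (tools.map pvNormalizeToolName) PySem.Set.empty []
  have h2 := pv_ded_eq_enum (tools.map pvNormalizeToolName) [] PySem.Set.empty pv_empty_inv
  simp only [List.nil_append, List.length_nil, Nat.cast_zero] at h1 h2
  have hfun : (fun p : Int × String => decide (p.2 ≠ "" ∧
      (pvFirstIdx (tools.map pvNormalizeToolName)).get? p.2 = some p.1)) =
      pvKeep (tools.map pvNormalizeToolName) := by
    funext p
    unfold pvKeep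
    rw [pv_get_first]
  simp only [split_tools, split_tools_alt, hfold, h1, h2, hfun]
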